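-- pv_equiv track=rewrite | github.com/Henrijian/WinterProgrammingCompetition | Day3/RucksackReorganization2.py | findDuplicatedChars
-- ===== SOURCE A (Python) =====
-- def findDuplicatedChars(str1, str2, str3):
--     if not isinstance(str1, str):
--         raise ValueError("str1 must be str type")
--     if not isinstance(str2, str):
--         raise ValueError("str2 must be str type")
--     if not isinstance(str3, str):
--         raise ValueError("str3 must be str type")
--     result = set()
--     chars1 = set(str1)
--     chars1and2 = set()
--     for char in str2:
--         if char in chars1:
--             chars1and2.add(char)
--     for char in str3:
--         if char in chars1and2:
--             result.add(char)
--     return result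
-- ===== SOURCE B (Python) =====
-- def findDuplicatedChars(str1, str2, str3):
--     if not isinstance(str1, str):
--         raise ValueError("str1 must be str type")
--     if not isinstance(str2, str):
--         raise ValueError("str2 must be str type")
--     if not isinstance(str3, str):
--         raise ValueError("str3 must be str type")
--     seen = {}
--     for i, s in enumerate((str1, str2, str3)):
--         for ch in s:
--             seen.setdefault(ch, set()).add(i)
--     return {ch for ch in str3 if len(seen[ch]) == 3}
-- ===== Notes on version B (the rewrite author's own statement) =====
-- stated objective: alternative
-- what changed: Replaces A's staged set intersections (set(str1), then str2-filtered intersection, then str3-filtered result) with one unified presence table mapping each character to the set of string-indices it occurs in, built in a single combined traversal, keeping the chars of str3 whose index-set has size 3.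
import Mathlib
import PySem

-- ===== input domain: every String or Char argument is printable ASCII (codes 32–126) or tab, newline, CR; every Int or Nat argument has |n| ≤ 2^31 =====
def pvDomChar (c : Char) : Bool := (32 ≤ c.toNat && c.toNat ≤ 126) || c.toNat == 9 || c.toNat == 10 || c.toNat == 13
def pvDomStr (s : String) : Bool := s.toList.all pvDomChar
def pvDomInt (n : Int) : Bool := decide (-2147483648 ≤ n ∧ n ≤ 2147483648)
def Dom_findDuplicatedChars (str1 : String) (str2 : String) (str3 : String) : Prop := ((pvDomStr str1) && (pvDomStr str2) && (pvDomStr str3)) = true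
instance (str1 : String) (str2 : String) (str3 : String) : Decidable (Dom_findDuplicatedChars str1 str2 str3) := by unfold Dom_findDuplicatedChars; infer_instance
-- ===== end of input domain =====

-- B replaces A's staged set intersections with one presence table (char → set of string-indices)
-- built in a single combined traversal; it keeps the chars of str3 whose index-set has size 3 (objective: alternative).
-- The three isinstance guards can never fire on String arguments, so the ports omit them and no Pre_ is needed.

-- ===== PORT A =====
def findDuplicatedChars (str1 : String) (str2 : String) (str3 : String) : List String :=
  -- chars1 = set(str1); chars1and2 = set(); for char in str2: if char in chars1: chars1and2.add(char);
  -- result = set(); for char in str3: if char in chars1and2: result.add(char); return result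
  str3.toList.foldl
    (fun s c =>
      if PySem.Set.contains
           (str2.toList.foldl
             (fun s c =>
               if PySem.Set.contains (PySem.Set.ofList (str1.toList.map (fun c => String.ofList [c]))) (String.ofList [c])
               then PySem.Set.add s (String.ofList [c]) else s)
             PySem.Set.empty)
           (String.ofList [c])
      then PySem.Set.add s (String.ofList [c]) else s)
    PySem.Set.empty

-- ===== PORT B =====
def findDuplicatedChars_alt (str1 : String) (str2 : String) (str3 : String) : List String :=
  -- seen = {}; for i, s in enumerate((str1, str2, str3)): for ch in s: seen.setdefault(ch, set()).add(i)
  -- return {ch for ch in str3 if len(seen[ch]) == 3}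
  PySem.Set.ofList
    ((str3.toList.filter (fun c =>
        PySem.Set.len
          (([(0, str1), (1, str2), (2, str3)].foldl
              (fun d p => p.2.toList.foldl
                (fun d c => d.modify (String.ofList [c]) [] (fun s => PySem.Set.add s p.1)) d)
              PySem.Dict.empty).getD (String.ofList [c]) []) == 3)).map
      (fun c => String.ofList [c]))

-- ===== PRECONDITION & SPEC =====
def Spec_findDuplicatedChars (str1 : String) (str2 : String) (str3 : String) (out : List String) : Prop := out = findDuplicatedChars_alt str1 str2 str3
instance (str1 : String) (str2 : String) (str3 : String) (out : List String) : Decidable (Spec_findDuplicatedChars str1 str2 str3 out) := by unfold Spec_findDuplicatedChars; infer_instance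

-- ===== CLAIM (what is proved, stated in full; the proofs are below) =====
def Claim_equal_findDuplicatedChars : Prop := ∀ (str1 : String) (str2 : String) (str3 : String), Dom_findDuplicatedChars str1 str2 str3 → Spec_findDuplicatedChars str1 str2 str3 (findDuplicatedChars str1 str2 str3)

-- ===== LEMMAS AND PROOFS =====

-- A's "for c in xs: if p c: s.add(f c)" loop is set-update by the filtered, mapped list.
lemma foldl_if_add {α β : Type} [BEq α] (p : β → Bool) (f : β → α) (xs : List β) (s : PySem.Set α) :
    xs.foldl (fun s c => if p c then PySem.Set.add s (f c) else s) s
      = PySem.Set.update s ((xs.filter p).map f) := by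
  induction xs generalizing s with
  | nil => simp [PySem.Set.update_nil]
  | cons x xs ih =>
    by_cases h : p x
    · simp only [List.foldl_cons, List.filter_cons, h, if_pos, List.map_cons,
        PySem.Set.update_cons]
      exact ih _
    · simp only [List.foldl_cons, List.filter_cons, h, Bool.false_eq_true, not_false_iff,
        if_neg]
      simpa [h] using ih s

lemma mem_map_ofList (c : Char) (cs : List Char) :
    String.ofList [c] ∈ cs.map (fun c => String.ofList [c]) ↔ c ∈ cs := by
  simp [List.mem_map, String.ofList_inj]

-- B's inner loop over one string: effect on a single lookup.
lemma getD_string_pass (i : Nat) (cs : List Char) (d : PySem.Dict String (PySem.Set Nat))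
    (y : String) :
    (cs.foldl (fun d c => d.modify (String.ofList [c]) [] (fun s => PySem.Set.add s i)) d).getD y []
      = if y ∈ cs.map (fun c => String.ofList [c]) then PySem.Set.add (d.getD y []) i
        else d.getD y [] := by
  induction cs generalizing d with
  | nil => simp
  | cons x xs ih =>
    simp only [List.foldl_cons, List.map_cons, List.mem_cons]
    rw [ih, PySem.Dict.getD_modify]
    by_cases hx : y = String.ofList [x]
    · subst hx
      by_cases ht : String.ofList [x] ∈ xs.map (fun c => String.ofList [c])
      · simp only [ht, if_pos, true_or]
        rw [PySem.Set.add_of_mem ((PySem.Set.mem_add _ _ _).mpr (Or.inr rfl))]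
      · simp [ht]
    · by_cases ht : y ∈ xs.map (fun c => String.ofList [c]) <;> simp [hx, ht]

-- A's membership test on chars1and2, as a plain condition on the input strings.
lemma containsA (str1 str2 : String) (c : Char) :
    PySem.Set.contains
        (PySem.Set.update PySem.Set.empty
          ((str2.toList.filter
              (fun b => PySem.Set.contains
                (PySem.Set.ofList (str1.toList.map (fun a => String.ofList [a])))
                (String.ofList [b]))).map (fun b => String.ofList [b])))
        (String.ofList [c])
      = decide (c ∈ str2.toList ∧ c ∈ str1.toList) := by
  rw [PySem.Set.update_empty, Bool.eq_iff_iff, PySem.Set.contains_iff, decide_eq_true_eq,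
    PySem.Set.mem_ofList]
  constructor
  · intro h
    rcases List.mem_map.mp h with ⟨b, hb, hbc⟩
    rw [String.ofList_inj] at hbc
    obtain rfl : b = c := List.singleton_injective hbc
    obtain ⟨hb2, hbp⟩ := List.mem_filter.mp hb
    refine ⟨hb2, ?_⟩
    have hm := (PySem.Set.contains_iff _ _).mp hbp
    rw [PySem.Set.mem_ofList] at hm
    rcases List.mem_map.mp hm with ⟨a, ha, hab⟩
    rw [String.ofList_inj] at hab
    obtain rfl : a = b := List.singleton_injective hab
    exact ha
  · rintro ⟨h2, h1⟩
    refine List.mem_map.mpr ⟨c, List.mem_filter.mpr ⟨h2, ?_⟩, rfl⟩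
    exact (PySem.Set.contains_iff _ _).mpr
      ((PySem.Set.mem_ofList _ _).mpr (List.mem_map.mpr ⟨c, h1, rfl⟩))

-- the filter conditions of the two ports agree on characters of str3
lemma conds_agree (str1 str2 str3 : String) (c : Char) (hc : c ∈ str3.toList) :
    (PySem.Set.contains
        (str2.toList.foldl
          (fun s c => if PySem.Set.contains (PySem.Set.ofList (str1.toList.map (fun c => String.ofList [c]))) (String.ofList [c])
                      then PySem.Set.add s (String.ofList [c]) else s)
          PySem.Set.empty)
        (String.ofList [c]))
      = (PySem.Set.len
          (([(0, str1), (1, str2), (2, str3)].foldl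
            (fun d p => p.2.toList.foldl
              (fun d c => d.modify (String.ofList [c]) [] (fun s => PySem.Set.add s p.1)) d)
            PySem.Dict.empty).getD (String.ofList [c]) []) == 3) := by
  rw [foldl_if_add, containsA]
  simp only [List.foldl_cons, List.foldl_nil]
  rw [getD_string_pass, getD_string_pass, getD_string_pass]
  by_cases h1 : c ∈ str1.toList <;> by_cases h2 : c ∈ str2.toList <;>
    simp [mem_map_ofList, h1, h2, hc]

-- ===== VERDICT (by name: the statement is the Claim_ definition above) =====
theorem findDuplicatedChars_spec : Claim_equal_findDuplicatedChars := by
  intro str1 str2 str3 _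
  unfold Spec_findDuplicatedChars findDuplicatedChars findDuplicatedChars_alt
  rw [foldl_if_add, PySem.Set.update_empty]
  congr 1
  apply congrArg
  apply List.filter_congr
  intro c hc
  exact conds_agree str1 str2 str3 c hc
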